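-- pv_equiv track=rewrite | github.com/jinan789/collecting_data | lib/Git.py | get_num_mod_lines
-- ===== SOURCE A (Python) =====
-- def get_num_mod_lines(file_to_mod_lines_dict, filter_if = False, filter_loop = False):
--     file_to_stats_dict = {}
--
--     for file_nm in file_to_mod_lines_dict.keys():
--
--         count_dict = [0,0,0] # added, deleted, total
--         diff_lines = file_to_mod_lines_dict[file_nm]
--         for l in diff_lines:
--             if filter_if:
--                 if "if" not in l.split():
--                     continue
--             if filter_loop:
--                 if "for" not in l.split() and "while" not in l.split():
--                     continue
--
--             if l[:1] == "+":
--                 count_dict[0] += 1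
--             elif l[:1] == "-":
--                 count_dict[1] += 1
--             else:
--                 raise Exception("something wrong!")
--         count_dict[2] = count_dict[0] + count_dict[1]
--         file_to_stats_dict[file_nm] = tuple(count_dict)
--
--     overall_counts = {}
--     overall_counts["num_adds"] = sum([t[0] for t in file_to_stats_dict.values()])
--     overall_counts["num_dels"] = sum([t[1] for t in file_to_stats_dict.values()])
--     overall_counts["num_mod_lns_total"] = sum([t[2] for t in file_to_stats_dict.values()])
--     overall_counts["num_mod_files"] = len(file_to_stats_dict.keys())
--
--     return file_to_stats_dict, overall_counts
-- ===== SOURCE B (Python) =====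
-- def get_num_mod_lines(file_to_mod_lines_dict, filter_if = False, filter_loop = False):
--     # classify a line once: 0 = filtered out, 1 = added, 2 = deleted, 3 = malformed
--     def classify(l):
--         ws = l.split()
--         if (filter_if and "if" not in ws) or \
--            (filter_loop and "for" not in ws and "while" not in ws):
--             return 0
--         c = l[:1]
--         if c == "+":
--             return 1
--         if c == "-":
--             return 2
--         return 3
--
--     file_to_stats_dict = {}
--     num_adds = 0
--     num_dels = 0
--     for file_nm, diff_lines in file_to_mod_lines_dict.items():
--         codes = [classify(l) for l in diff_lines]
--         if 3 in codes:
--             raise Exception("something wrong!")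
--         adds = codes.count(1)
--         dels = codes.count(2)
--         file_to_stats_dict[file_nm] = (adds, dels, adds + dels)
--         num_adds += adds
--         num_dels += dels
--
--     overall_counts = {
--         "num_adds": num_adds,
--         "num_dels": num_dels,
--         "num_mod_lns_total": num_adds + num_dels,
--         "num_mod_files": len(file_to_stats_dict),
--     }
--     return file_to_stats_dict, overall_counts
-- ===== Notes on version B (the rewrite author's own statement) =====
-- stated objective: alternative
-- what changed: Each line is classified once into a numeric code (filtered/added/deleted/malformed) and per-file stats come from list.count over the code list instead of A's per-line if/elif mutable-accumulator branching, while the overall totals and file count are accumulated in the same per-file pass, eliminating A's three trailing sum() comprehensions over the stats dict.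
import Mathlib
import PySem

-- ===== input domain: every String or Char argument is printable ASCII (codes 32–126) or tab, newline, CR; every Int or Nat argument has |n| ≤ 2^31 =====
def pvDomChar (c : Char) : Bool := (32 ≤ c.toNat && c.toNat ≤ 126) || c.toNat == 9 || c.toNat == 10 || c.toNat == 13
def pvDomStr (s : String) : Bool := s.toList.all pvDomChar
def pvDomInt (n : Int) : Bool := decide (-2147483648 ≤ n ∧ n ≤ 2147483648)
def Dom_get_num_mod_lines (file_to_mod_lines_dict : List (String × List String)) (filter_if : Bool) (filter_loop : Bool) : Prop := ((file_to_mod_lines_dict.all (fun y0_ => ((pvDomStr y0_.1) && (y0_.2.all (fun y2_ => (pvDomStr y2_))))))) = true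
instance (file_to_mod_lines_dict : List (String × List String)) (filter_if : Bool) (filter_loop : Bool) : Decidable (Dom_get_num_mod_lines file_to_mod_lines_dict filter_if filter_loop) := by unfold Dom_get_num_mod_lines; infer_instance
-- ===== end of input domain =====

-- B classifies each line once into a numeric code and derives per-file stats by list.count over
-- the code list, fusing the overall totals into the same pass instead of A's per-line if/elif
-- accumulator plus three trailing sum() comprehensions; equivalence of RETURN values proved.

-- ===== PORT A =====
-- per-line body of A's inner loop: the two `continue` filters, then the +/- branches.
-- The final `else` is Python's `raise Exception("something wrong!")`: Pre_ excludes exactly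
-- those inputs, so the branch is unreachable under Pre_ (it leaves the state unchanged here).
def pvStepA (filter_if filter_loop : Bool) (c : Int × Int × Int) (l : String) : Int × Int × Int :=
  if filter_if && !((PySem.Str.split₀ l).contains "if") then c
  else if filter_loop && (!((PySem.Str.split₀ l).contains "for") && !((PySem.Str.split₀ l).contains "while")) then c
  else if PySem.Str.slice l none (some 1) == "+" then (c.1 + 1, c.2.1, c.2.2)
  else if PySem.Str.slice l none (some 1) == "-" then (c.1, c.2.1 + 1, c.2.2)
  else c

def get_num_mod_lines (file_to_mod_lines_dict : List (String × List String)) (filter_if : Bool) (filter_loop : Bool) : (List (String × Int × Int × Int)) × (List (String × Int)) :=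
  let d := PySem.Dict.ofList file_to_mod_lines_dict
  -- for file_nm in d.keys(): count_dict = [0,0,0]; inner loop; count_dict[2] = ...; store tuple
  let file_to_stats_dict :=
    d.keys.foldl (fun st file_nm =>
      let diff_lines := d.getD file_nm []   -- d[file_nm]; file_nm ∈ keys, so no KeyError
      let c := diff_lines.foldl (pvStepA filter_if filter_loop) (0, 0, 0)
      st.insert file_nm (c.1, c.2.1, c.1 + c.2.1)) PySem.Dict.empty
  let overall_counts :=
    ((((PySem.Dict.empty.insert "num_adds" ((file_to_stats_dict.values.map (fun t => t.1)).sum)).insert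
        "num_dels" ((file_to_stats_dict.values.map (fun t => t.2.1)).sum)).insert
        "num_mod_lns_total" ((file_to_stats_dict.values.map (fun t => t.2.2)).sum)).insert
        "num_mod_files" (file_to_stats_dict.keys.length : Int))
  (file_to_stats_dict.items, overall_counts.items)

-- ===== PORT B =====
-- Source B's helper classify(l): 0 = filtered out, 1 = added, 2 = deleted, 3 = malformed
def pvClassify (filter_if filter_loop : Bool) (l : String) : Int :=
  if (filter_if && !((PySem.Str.split₀ l).contains "if")) ||
     (filter_loop && (!((PySem.Str.split₀ l).contains "for") && !((PySem.Str.split₀ l).contains "while"))) then 0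
  else if PySem.Str.slice l none (some 1) == "+" then 1
  else if PySem.Str.slice l none (some 1) == "-" then 2
  else 3

def get_num_mod_lines_alt (file_to_mod_lines_dict : List (String × List String)) (filter_if : Bool) (filter_loop : Bool) : (List (String × Int × Int × Int)) × (List (String × Int)) :=
  let d := PySem.Dict.ofList file_to_mod_lines_dict
  -- single pass over d.items(): codes = [classify(l) ...]; counts from codes; running totals.
  -- Source B's `if 3 in codes: raise` fires exactly where Pre_ fails, so it has no branch here.
  let acc := d.items.foldl
    (fun (acc : PySem.Dict String (Int × Int × Int) × Int × Int) p =>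
      let codes := p.2.map (pvClassify filter_if filter_loop)
      let adds : Int := (PySem.List.count codes 1 : Nat)
      let dels : Int := (PySem.List.count codes 2 : Nat)
      (acc.1.insert p.1 (adds, dels, adds + dels), acc.2.1 + adds, acc.2.2 + dels))
    (PySem.Dict.empty, 0, 0)
  (acc.1.items,
   [("num_adds", acc.2.1), ("num_dels", acc.2.2),
    ("num_mod_lns_total", acc.2.1 + acc.2.2), ("num_mod_files", (acc.1.size : Int))])

-- ===== PRECONDITION & SPEC =====
-- whether a line passes A's two `continue` filters (proof-side predicate, used only by Pre_)
def pvKept (filter_if filter_loop : Bool) (l : String) : Bool :=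
  if filter_if && !((PySem.Str.split₀ l).contains "if") then false
  else if filter_loop && (!((PySem.Str.split₀ l).contains "for") && !((PySem.Str.split₀ l).contains "while")) then false
  else true

-- Pre_ excludes exactly the inputs on which A raises Exception("something wrong!"):
-- some line that survives the filters does not start with "+" or "-" (B raises there too).
def Pre_get_num_mod_lines (file_to_mod_lines_dict : List (String × List String)) (filter_if : Bool) (filter_loop : Bool) : Prop :=
  ∀ p ∈ (PySem.Dict.ofList file_to_mod_lines_dict).items, ∀ l ∈ p.2,
    pvKept filter_if filter_loop l = true →
      (PySem.Str.startswith l "+" || PySem.Str.startswith l "-") = true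
instance (file_to_mod_lines_dict : List (String × List String)) (filter_if : Bool) (filter_loop : Bool) : Decidable (Pre_get_num_mod_lines file_to_mod_lines_dict filter_if filter_loop) := by unfold Pre_get_num_mod_lines; infer_instance

def pvWitness_get_num_mod_lines : (List (String × List String)) × Bool × Bool :=
  ([("Git.py", ["+ if x", "- y"]), ("lib.py", [])], false, false)

def Spec_get_num_mod_lines (file_to_mod_lines_dict : List (String × List String)) (filter_if : Bool) (filter_loop : Bool) (out : (List (String × Int × Int × Int)) × (List (String × Int))) : Prop := out = get_num_mod_lines_alt file_to_mod_lines_dict filter_if filter_loop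
instance (file_to_mod_lines_dict : List (String × List String)) (filter_if : Bool) (filter_loop : Bool) (out : (List (String × Int × Int × Int)) × (List (String × Int))) : Decidable (Spec_get_num_mod_lines file_to_mod_lines_dict filter_if filter_loop out) := by unfold Spec_get_num_mod_lines; infer_instance

-- ===== CLAIM (what is proved, stated in full; the proofs are below) =====
def Claim_equal_get_num_mod_lines : Prop := ∀ (file_to_mod_lines_dict : List (String × List String)) (filter_if : Bool) (filter_loop : Bool), Dom_get_num_mod_lines file_to_mod_lines_dict filter_if filter_loop → Pre_get_num_mod_lines file_to_mod_lines_dict filter_if filter_loop → Spec_get_num_mod_lines file_to_mod_lines_dict filter_if filter_loop (get_num_mod_lines file_to_mod_lines_dict filter_if filter_loop)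

-- ===== LEMMAS AND PROOFS =====

-- s[:1] == "<c>" is s.startswith("<c>"), and both are "the first character is c"
theorem pv_startswith_take1 (l : String) (c : Char) :
    PySem.Str.startswith l (String.ofList [c]) = decide (l.toList.take 1 = [c]) := by
  have h2 : PySem.Str.startswith l (String.ofList [c]) = PySem.Chars.startswith l.toList [c] := by
    simp [pysem]
  rw [h2]
  rcases l.toList with _ | ⟨a, as⟩
  · simp [PySem.Chars.startswith]
  · simp only [PySem.Chars.startswith, List.take_succ_cons, List.take_zero, List.isPrefixOf,
      Bool.and_true, List.cons.injEq, and_true]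
    rw [Bool.beq_eq_decide_eq]
    simp [eq_comm]

theorem pv_slice1_beq (l : String) (c : Char) :
    (PySem.Str.slice l none (some 1) == String.ofList [c]) = PySem.Str.startswith l (String.ofList [c]) := by
  have h1 : (PySem.Str.slice l none (some 1)).toList = l.toList.take 1 := by simp [pysem]
  have h3 : (PySem.Str.slice l none (some 1) == String.ofList [c]) = decide (l.toList.take 1 = [c]) := by
    rw [Bool.beq_eq_decide_eq]
    simp only [← String.toList_inj, String.toList_ofList, h1]
  rw [h3, pv_startswith_take1]

-- the per-file value both programs store, phrased in B's vocabulary (code counts)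
def pvAdds (filter_if filter_loop : Bool) (lines : List String) : Int :=
  (PySem.List.count (lines.map (pvClassify filter_if filter_loop)) 1 : Nat)
def pvDels (filter_if filter_loop : Bool) (lines : List String) : Int :=
  (PySem.List.count (lines.map (pvClassify filter_if filter_loop)) 2 : Nat)
def pvStat (filter_if filter_loop : Bool) (lines : List String) : Int × Int × Int :=
  (pvAdds filter_if filter_loop lines, pvDels filter_if filter_loop lines,
   pvAdds filter_if filter_loop lines + pvDels filter_if filter_loop lines)

-- a line cannot start with both "+" and "-"
theorem pv_not_both (l : String) (hp : PySem.Str.startswith l "+" = true) :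
    PySem.Str.startswith l "-" = false := by
  rw [pv_startswith_take1 l '+'] at hp
  rw [pv_startswith_take1 l '-']
  simp at hp
  simp [hp]

theorem pv_foldA_count (filter_if filter_loop : Bool) (lines : List String)
    (h : ∀ l ∈ lines, pvKept filter_if filter_loop l = true →
      (PySem.Str.startswith l "+" || PySem.Str.startswith l "-") = true) :
    ∀ a b t : Int, lines.foldl (pvStepA filter_if filter_loop) (a, b, t) =
      (a + pvAdds filter_if filter_loop lines, b + pvDels filter_if filter_loop lines, t) := by
  induction lines with
  | nil => intro a b t; simp [pvAdds, pvDels, PySem.List.count]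
  | cons l ls ih =>
    intro a b t
    have hrest := fun x hx => h x (List.mem_cons_of_mem l hx)
    simp only [List.foldl_cons]
    by_cases h1 : (filter_if && !((PySem.Str.split₀ l).contains "if")) = true
    · have hc : pvClassify filter_if filter_loop l = 0 := by
        unfold pvClassify; rw [h1, Bool.true_or]; simp
      rw [show pvStepA filter_if filter_loop (a, b, t) l = (a, b, t) by
        unfold pvStepA; rw [if_pos h1],
        ih hrest]
      simp [pvAdds, pvDels, PySem.List.count_eq, hc, List.count_cons]
    · by_cases h2 : (filter_loop && (!((PySem.Str.split₀ l).contains "for") && !((PySem.Str.split₀ l).contains "while"))) = true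
      · have hc : pvClassify filter_if filter_loop l = 0 := by
          unfold pvClassify; rw [h2, Bool.or_true]; simp
        rw [show pvStepA filter_if filter_loop (a, b, t) l = (a, b, t) by
          unfold pvStepA; rw [if_neg h1, if_pos h2],
          ih hrest]
        simp [pvAdds, pvDels, PySem.List.count_eq, hc, List.count_cons]
      · have hk : pvKept filter_if filter_loop l = true := by
          unfold pvKept; rw [if_neg h1, if_neg h2]
        have hpm := h l (List.mem_cons_self) hk
        have hor : ((filter_if && !((PySem.Str.split₀ l).contains "if")) ||
            (filter_loop && (!((PySem.Str.split₀ l).contains "for") && !((PySem.Str.split₀ l).contains "while")))) = false := by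
          simp only [Bool.or_eq_false_iff]
          exact ⟨by simpa using h1, by simpa using h2⟩
        by_cases hp : PySem.Str.startswith l "+" = true
        · have hm : PySem.Str.startswith l "-" = false := pv_not_both l hp
          have hc : pvClassify filter_if filter_loop l = 1 := by
            unfold pvClassify
            rw [hor, if_neg (by decide : ¬ (false = true)), pv_slice1_beq l '+', if_pos hp]
          rw [show pvStepA filter_if filter_loop (a, b, t) l = (a + 1, b, t) by
            unfold pvStepA; rw [if_neg h1, if_neg h2, pv_slice1_beq l '+', if_pos hp], ih hrest]
          simp only [pvAdds, pvDels, PySem.List.count_eq, List.map_cons, List.count_cons, hc,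
            Prod.mk.injEq, and_true]
          norm_num
          omega
        · have hm : PySem.Str.startswith l "-" = true := by
            cases hm : PySem.Str.startswith l "-" <;> simp_all
          have hc : pvClassify filter_if filter_loop l = 2 := by
            unfold pvClassify
            rw [hor, if_neg (by decide : ¬ (false = true)), pv_slice1_beq l '+', if_neg hp,
              pv_slice1_beq l '-', if_pos hm]
          rw [show pvStepA filter_if filter_loop (a, b, t) l = (a, b + 1, t) by
            unfold pvStepA
            rw [if_neg h1, if_neg h2, pv_slice1_beq l '+', if_neg hp,
              pv_slice1_beq l '-', if_pos hm], ih hrest]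
          simp only [pvAdds, pvDels, PySem.List.count_eq, List.map_cons, List.count_cons, hc,
            Prod.mk.injEq, and_true]
          norm_num
          omega

theorem pv_foldB_split (filter_if filter_loop : Bool) (L : List (String × List String)) :
    ∀ (st : PySem.Dict String (Int × Int × Int)) (a b : Int),
      L.foldl (fun (acc : PySem.Dict String (Int × Int × Int) × Int × Int) p =>
          let codes := p.2.map (pvClassify filter_if filter_loop)
          let adds : Int := (PySem.List.count codes 1 : Nat)
          let dels : Int := (PySem.List.count codes 2 : Nat)
          (acc.1.insert p.1 (adds, dels, adds + dels), acc.2.1 + adds, acc.2.2 + dels))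
        (st, a, b) =
      (L.foldl (fun st p => st.insert p.1 (pvStat filter_if filter_loop p.2)) st,
       a + (L.map (fun p => pvAdds filter_if filter_loop p.2)).sum,
       b + (L.map (fun p => pvDels filter_if filter_loop p.2)).sum) := by
  induction L with
  | nil => intro st a b; simp
  | cons p ps ih =>
    intro st a b
    simp only [List.foldl_cons, List.map_cons, List.sum_cons]
    rw [ih]
    simp only [pvStat, pvAdds, pvDels, Prod.mk.injEq, true_and]
    constructor <;> push_cast <;> ring

theorem pv_overall_items (w x y z : Int) :
    ((((PySem.Dict.empty.insert "num_adds" w).insert "num_dels" x).insert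
        "num_mod_lns_total" y).insert "num_mod_files" z).items =
      [("num_adds", w), ("num_dels", x), ("num_mod_lns_total", y), ("num_mod_files", z)] := rfl

-- ===== VERDICT (by name: the statement is the Claim_ definition above) =====
theorem get_num_mod_lines_spec : Claim_equal_get_num_mod_lines := by
  intro input fi fl _ hpre
  unfold Spec_get_num_mod_lines get_num_mod_lines get_num_mod_lines_alt
  simp only []
  set d := PySem.Dict.ofList input with hd
  have hnd : d.keys.Nodup := PySem.Dict.nodup_keys_ofList input
  have hkeys : d.keys = d.items.map Prod.fst := rfl
  -- A's per-file loop over keys() is the same fold over items()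
  have hA : d.keys.foldl (fun st file_nm =>
        let diff_lines := d.getD file_nm []
        let c := diff_lines.foldl (pvStepA fi fl) (0, 0, 0)
        st.insert file_nm (c.1, c.2.1, c.1 + c.2.1)) PySem.Dict.empty =
      d.items.foldl (fun st p => st.insert p.1 (pvStat fi fl p.2)) PySem.Dict.empty := by
    rw [hkeys, List.foldl_map]
    refine PySem.List.foldl_congr_mem _ _ _ _ ?_
    intro st p hp
    have hget : d.getD p.1 [] = p.2 :=
      PySem.Dict.getD_of_mem_items d (by simpa using hp) hnd []
    simp only [hget, pv_foldA_count fi fl p.2 (hpre p hp) 0 0 0, pvStat, zero_add]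
  rw [hA, pv_foldB_split fi fl d.items PySem.Dict.empty 0 0]
  set SF := d.items.foldl (fun st p => st.insert p.1 (pvStat fi fl p.2)) PySem.Dict.empty with hSF
  have hItems : SF.items = d.items.map (fun p => (p.1, pvStat fi fl p.2)) := by
    have := PySem.Dict.items_foldl_insert_fresh d.items Prod.fst
      (fun p => pvStat fi fl p.2) PySem.Dict.empty
      (fun a _ => PySem.Dict.contains_empty (ν := Int × Int × Int) a.1) (by rw [← hkeys]; exact hnd)
    simpa using this
  have hvals : SF.values = d.items.map (fun p => pvStat fi fl p.2) := by
    show SF.items.map (·.2) = _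
    rw [hItems, List.map_map]
    rfl
  have hklen : SF.keys.length = d.items.length := by
    show (SF.items.map (·.1)).length = _
    rw [hItems]; simp
  have hsize : SF.size = d.items.length := by
    show SF.items.length = _
    rw [hItems]; simp
  rw [pv_overall_items]
  refine Prod.ext rfl ?_
  simp only [hvals, hklen, hsize, List.map_map, zero_add]
  have h1 : d.items.map ((fun t : Int × Int × Int => t.1) ∘ fun p : String × List String => pvStat fi fl p.2) =
      d.items.map (fun p => pvAdds fi fl p.2) := rfl
  have h2 : d.items.map ((fun t : Int × Int × Int => t.2.1) ∘ fun p : String × List String => pvStat fi fl p.2) =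
      d.items.map (fun p => pvDels fi fl p.2) := rfl
  have h3 : d.items.map ((fun t : Int × Int × Int => t.2.2) ∘ fun p : String × List String => pvStat fi fl p.2) =
      d.items.map (fun p => pvAdds fi fl p.2 + pvDels fi fl p.2) := rfl
  rw [h1, h2, h3, PySem.List.sum_map_add_int]
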